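-- pv_equiv track=rewrite | github.com/tookek/ibs-python-test-repo | Filtering_an_array_based_on_string_case/find_different_regs.py | find_in_different_registers
-- ===== SOURCE A (Python) =====
-- def find_in_different_registers(word_list: list[str]) -> list[str]:
--     uniq_words = []
--     iterator_words = iter(word_list)
--
--     for it_word in iterator_words:
--         if word_list.count(it_word) > 1:
--             word_list = [word for word in word_list if word.lower() != it_word.lower()]
--     for word in word_list:
--         if word.lower() not in uniq_words:
--             uniq_words.append(word.lower())
--
--     return uniq_words
-- ===== SOURCE B (Python) =====
-- def find_in_different_registers(word_list: list[str]) -> list[str]: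
--     groups = {}
--     for w in word_list:
--         k = w.lower()
--         groups[k] = groups.get(k, []) + [w]
--     return [k for k, ms in groups.items() if len(ms) == len(set(ms))]
-- ===== Notes on version B (the rewrite author's own statement) =====
-- stated objective: faster
-- what changed: Replaced A's repeated list.count scans and whole-list rebuilding per element by a single group-by-lowercase dict pass followed by one per-group duplicate test (len(ms) == len(set(ms))).
import Mathlib
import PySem

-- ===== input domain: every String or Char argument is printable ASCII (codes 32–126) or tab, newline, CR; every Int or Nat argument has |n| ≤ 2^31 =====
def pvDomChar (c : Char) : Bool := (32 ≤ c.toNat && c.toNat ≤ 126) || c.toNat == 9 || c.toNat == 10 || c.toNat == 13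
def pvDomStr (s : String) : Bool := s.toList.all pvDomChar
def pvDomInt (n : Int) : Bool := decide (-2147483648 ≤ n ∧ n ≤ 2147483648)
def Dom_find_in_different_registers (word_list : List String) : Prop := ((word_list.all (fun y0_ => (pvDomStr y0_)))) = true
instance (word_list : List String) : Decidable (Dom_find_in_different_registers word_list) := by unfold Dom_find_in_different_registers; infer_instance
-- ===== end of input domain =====

-- B replaces A's repeated count-and-rebuild passes by one group-by-lowercase dict pass plus a per-group duplicate test (objective: faster).

-- ===== PORT A =====
def find_in_different_registers (word_list : List String) : List String :=
  -- first loop: iterates over the ORIGINAL list; the name `word_list` is rebound (filtered) along the way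
  let wl := word_list.foldl (fun cur it =>
    if 1 < PySem.List.count cur it then
      cur.filter (fun w => PySem.Str.lower w != PySem.Str.lower it)
    else cur) word_list
  -- second loop: append each word's lowercase form if not already collected
  wl.foldl (fun uniq w =>
    if uniq.contains (PySem.Str.lower w) then uniq else uniq ++ [PySem.Str.lower w]) []

-- ===== PORT B =====
def find_in_different_registers_alt (word_list : List String) : List String :=
  let groups : PySem.Dict String (List String) :=
    word_list.foldl (fun d w => d.modify (PySem.Str.lower w) [] (fun ms => ms ++ [w])) PySem.Dict.empty
  (groups.items.filter (fun p => p.2.length == (PySem.Set.ofList p.2).length)).map (fun p => p.1)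

-- ===== PRECONDITION & SPEC =====
def Spec_find_in_different_registers (word_list : List String) (out : List String) : Prop := out = find_in_different_registers_alt word_list
instance (word_list : List String) (out : List String) : Decidable (Spec_find_in_different_registers word_list out) := by unfold Spec_find_in_different_registers; infer_instance

-- ===== CLAIM (what is proved, stated in full; the proofs are below) =====
def Claim_equal_find_in_different_registers : Prop := ∀ (word_list : List String), Dom_find_in_different_registers word_list → Spec_find_in_different_registers word_list (find_in_different_registers word_list)

-- ===== LEMMAS AND PROOFS =====

-- the group of key k in L (first-loop removals act on whole groups)
def pvGrp (L : List String) (k : String) : List String := L.filter (fun w => PySem.Str.lower w == k)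

-- k's group gets removed by A's first loop: some member of it is an exact-case duplicate in L
def pvBad (L : List String) (k : String) : Bool :=
  L.any (fun it => (PySem.Str.lower it == k) && decide (1 < L.count it))

theorem pv_count_filter {α : Type} [DecidableEq α] {p : α → Bool} {a : α}
    (h : p a = true) (l : List α) : (l.filter p).count a = l.count a := by
  induction l with
  | nil => simp
  | cons b l ih =>
    by_cases hb : p b = true
    · simp [hb, List.count_cons, ih]
    · have hba : ¬ (b = a) := by rintro rfl; exact hb h
      simp [hb, ih, hba]

theorem pv_beq_comm {α : Type} [DecidableEq α] (a b : α) : (a == b) = (b == a) := by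
  by_cases h : a = b
  · subst h; rfl
  · rw [beq_eq_false_iff_ne.mpr h, beq_eq_false_iff_ne.mpr (Ne.symm h)]

theorem pv_loop1 (L P : List String) (c : String → Bool) :
    P.foldl (fun cur it =>
      if 1 < PySem.List.count cur it then
        cur.filter (fun w => PySem.Str.lower w != PySem.Str.lower it)
      else cur) (L.filter (fun w => !(c (PySem.Str.lower w)))) =
    L.filter (fun w => !(c (PySem.Str.lower w) ||
      P.any (fun it => (PySem.Str.lower it == PySem.Str.lower w) && decide (1 < L.count it)))) := by
  induction P generalizing c with
  | nil => simp
  | cons it P ih =>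
    rw [List.foldl_cons]
    by_cases hc : c (PySem.Str.lower it) = true
    · have hcount : PySem.List.count (L.filter (fun w => !(c (PySem.Str.lower w)))) it = 0 := by
        rw [PySem.List.count_eq, List.count_eq_zero]
        intro hmem
        have h2 := (List.mem_filter.mp hmem).2
        simp [hc] at h2
      rw [hcount, if_neg (by decide)]
      rw [ih c]
      apply List.filter_congr
      intro w _
      by_cases hw : c (PySem.Str.lower w) = true
      · simp [hw]
      · have hne : (PySem.Str.lower it == PySem.Str.lower w) = false := by
          apply beq_eq_false_iff_ne.mpr
          intro heq
          rw [heq] at hc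
          exact hw hc
        simp [hw, hne, List.any_cons]
    · replace hc : c (PySem.Str.lower it) = false := by simpa using hc
      have hcount : PySem.List.count (L.filter (fun w => !(c (PySem.Str.lower w)))) it
          = L.count it := by
        rw [PySem.List.count_eq]
        exact pv_count_filter (by simp [hc]) L
      rw [hcount]
      by_cases h1 : 1 < L.count it
      · rw [if_pos h1, List.filter_filter]
        have hfe : (L.filter (fun a => (PySem.Str.lower a != PySem.Str.lower it) && !(c (PySem.Str.lower a))))
            = L.filter (fun w => !((fun k => c k || (k == PySem.Str.lower it)) (PySem.Str.lower w))) := by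
          apply List.filter_congr
          intro w _
          simp only [Bool.not_or, bne]
          rw [Bool.and_comm]
        rw [hfe, ih (fun k => c k || (k == PySem.Str.lower it))]
        apply List.filter_congr
        intro w _
        have hcomm : (PySem.Str.lower it == PySem.Str.lower w) = (PySem.Str.lower w == PySem.Str.lower it) :=
          pv_beq_comm _ _
        simp only [List.any_cons, hcomm]
        simp only [decide_eq_true h1, Bool.and_true]
        cases c (PySem.Str.lower w) <;>
          cases (PySem.Str.lower w == PySem.Str.lower it) <;> simp
      · rw [if_neg h1, ih c]
        apply List.filter_congr
        intro w _
        have h1' : decide (1 < L.count it) = false := by simpa using h1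
        simp [List.any_cons, h1']

theorem pv_loop1' (L : List String) :
    L.foldl (fun cur it =>
      if 1 < PySem.List.count cur it then
        cur.filter (fun w => PySem.Str.lower w != PySem.Str.lower it)
      else cur) L =
    L.filter (fun w => !(pvBad L (PySem.Str.lower w))) := by
  have h := pv_loop1 L L (fun _ => false)
  simpa [pvBad] using h

theorem pv_ofList_filter {α : Type} [DecidableEq α] (q : α → Bool) (xs : List α) :
    PySem.Set.ofList (xs.filter q) = (PySem.Set.ofList xs).filter q := by
  induction xs using List.reverseRecOn with
  | nil => simp
  | append_singleton xs x ih =>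
    rw [List.filter_append, PySem.Set.ofList_append_singleton]
    by_cases hx : q x = true
    · rw [show List.filter q [x] = [x] by simp [hx], PySem.Set.ofList_append_singleton, ih]
      by_cases hmem : x ∈ PySem.Set.ofList xs
      · have h1 : PySem.Set.add (PySem.Set.ofList xs) x = PySem.Set.ofList xs := by
          simp [PySem.Set.add, hmem]
        have h2 : PySem.Set.add ((PySem.Set.ofList xs).filter q) x = (PySem.Set.ofList xs).filter q := by
          simp [PySem.Set.add, List.mem_filter.mpr ⟨hmem, hx⟩]
        rw [h1, h2]
      · have h1 : PySem.Set.add (PySem.Set.ofList xs) x = PySem.Set.ofList xs ++ [x] := by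
          simp [PySem.Set.add, hmem]
        have hmf : x ∉ (PySem.Set.ofList xs).filter q := fun h => hmem (List.mem_filter.mp h).1
        have h2 : PySem.Set.add ((PySem.Set.ofList xs).filter q) x
            = (PySem.Set.ofList xs).filter q ++ [x] := by
          simp [PySem.Set.add, hmf]
        rw [h1, h2, List.filter_append, show List.filter q [x] = [x] by simp [hx]]
    · replace hx : q x = false := by simpa using hx
      rw [show List.filter q [x] = [] by simp [hx], List.append_nil, ih]
      by_cases hmem : x ∈ PySem.Set.ofList xs
      · have h1 : PySem.Set.add (PySem.Set.ofList xs) x = PySem.Set.ofList xs := by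
          simp [PySem.Set.add, hmem]
        rw [h1]
      · have h1 : PySem.Set.add (PySem.Set.ofList xs) x = PySem.Set.ofList xs ++ [x] := by
          simp [PySem.Set.add, hmem]
        rw [h1, List.filter_append, show List.filter q [x] = [] by simp [hx], List.append_nil]

theorem pv_length_ofList_eq_iff {α : Type} [DecidableEq α] (xs : List α) :
    ((PySem.Set.ofList xs).length = xs.length) ↔ xs.Nodup := by
  induction xs using List.reverseRecOn with
  | nil => simp
  | append_singleton xs x ih =>
    rw [PySem.Set.ofList_append_singleton, List.length_append, List.length_singleton,
      List.nodup_append]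
    by_cases hmem : x ∈ PySem.Set.ofList xs
    · have h1 : PySem.Set.add (PySem.Set.ofList xs) x = PySem.Set.ofList xs := by
        simp [PySem.Set.add, hmem]
      have hle := PySem.Set.length_ofList_le (xs := xs)
      have hmx : x ∈ xs := (PySem.Set.mem_ofList _ _).mp hmem
      rw [h1]
      constructor
      · intro h; omega
      · rintro ⟨-, -, hdisj⟩
        exact absurd rfl (hdisj x hmx x (List.mem_singleton_self x))
    · have h1 : PySem.Set.add (PySem.Set.ofList xs) x = PySem.Set.ofList xs ++ [x] := by
        simp [PySem.Set.add, hmem]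
      have hmx : x ∉ xs := fun h => hmem ((PySem.Set.mem_ofList _ _).mpr h)
      rw [h1, List.length_append, List.length_singleton]
      constructor
      · intro h
        refine ⟨ih.mp (by omega), List.nodup_singleton x, ?_⟩
        intro a ha b hb
        rw [List.mem_singleton.mp hb]
        rintro rfl
        exact hmx ha
      · rintro ⟨hnd, -, -⟩
        have := ih.mpr hnd
        omega

theorem pv_good_eq_not_bad (L : List String) (k : String) :
    ((pvGrp L k).length == (PySem.Set.ofList (pvGrp L k)).length) = !(pvBad L k) := by
  have hcount : ∀ a : String, (pvGrp L k).count a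
      = if PySem.Str.lower a = k then L.count a else 0 := by
    intro a
    by_cases ha : PySem.Str.lower a = k
    · rw [if_pos ha]
      exact pv_count_filter (by simp [ha]) L
    · rw [if_neg ha, List.count_eq_zero]
      intro hmem
      exact ha (by simpa using (List.mem_filter.mp hmem).2)
  have hnodup : (pvGrp L k).Nodup ↔ pvBad L k = false := by
    rw [List.nodup_iff_count_le_one]
    constructor
    · intro h
      rw [← Bool.not_eq_true, pvBad]
      intro hany
      obtain ⟨it, hit, hcond⟩ := List.any_eq_true.mp hany
      obtain ⟨hlow', hcnt'⟩ : PySem.Str.lower it = k ∧ 1 < L.count it := by simpa using hcond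
      have := h it
      rw [hcount it, if_pos hlow'] at this
      omega
    · intro h a
      by_contra hgt
      push_neg at hgt
      have hmem : a ∈ pvGrp L k := List.count_pos_iff.mp (by omega)
      have hak : PySem.Str.lower a = k := by simpa using (List.mem_filter.mp hmem).2
      have haL : a ∈ L := (List.mem_filter.mp hmem).1
      have hca : 1 < L.count a := by
        have := hcount a
        rw [if_pos hak] at this
        omega
      have : pvBad L k = true := by
        rw [pvBad]
        refine List.any_eq_true.mpr ⟨a, haL, ?_⟩
        simp [hak, hca]
      rw [this] at h
      exact Bool.noConfusion h
  by_cases hb : pvBad L k = true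
  · rw [hb]
    have hnd : ¬ (pvGrp L k).Nodup := by
      rw [hnodup, hb]; simp
    have hne : (pvGrp L k).length ≠ (PySem.Set.ofList (pvGrp L k)).length := by
      intro h
      exact hnd ((pv_length_ofList_eq_iff _).mp h.symm)
    simpa using hne
  · replace hb : pvBad L k = false := by simpa using hb
    rw [hb]
    have hnd : (pvGrp L k).Nodup := hnodup.mpr hb
    have heq := (pv_length_ofList_eq_iff (pvGrp L k)).mpr hnd
    simp [heq.symm]

theorem pv_second_loop (R : List String) :
    R.foldl (fun uniq w =>
      if uniq.contains (PySem.Str.lower w) then uniq else uniq ++ [PySem.Str.lower w]) [] =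
    PySem.Set.ofList (R.map PySem.Str.lower) := by
  rw [show (fun (uniq : List String) w =>
      if uniq.contains (PySem.Str.lower w) then uniq else uniq ++ [PySem.Str.lower w])
      = (fun uniq w => PySem.Set.add uniq (PySem.Str.lower w)) from rfl]
  rw [← PySem.Set.update_map_eq_foldl_add]
  exact PySem.Set.update_nil_left _

-- ===== VERDICT (by name: the statement is the Claim_ definition above) =====
theorem find_in_different_registers_spec : Claim_equal_find_in_different_registers := by
  intro L _
  unfold Spec_find_in_different_registers find_in_different_registers find_in_different_registers_alt
  simp only []
  -- A side
  rw [pv_loop1', pv_second_loop]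
  have hmf : (L.filter (fun w => !(pvBad L (PySem.Str.lower w)))).map PySem.Str.lower
      = (L.map PySem.Str.lower).filter (fun k => !(pvBad L k)) := by
    rw [List.filter_map]
    rfl
  rw [hmf, pv_ofList_filter]
  -- B side
  have hkeys : (L.foldl (fun d w => d.modify (PySem.Str.lower w) [] (fun ms => ms ++ [w]))
        PySem.Dict.empty).keys = PySem.Set.ofList (L.map PySem.Str.lower) := by
    rw [PySem.Dict.keys_foldl_modify_key]
    simp [PySem.Set.update_nil_left]
  have hgetD : ∀ k, (L.foldl (fun d w => d.modify (PySem.Str.lower w) [] (fun ms => ms ++ [w]))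
        PySem.Dict.empty).getD k [] = pvGrp L k := by
    intro k
    rw [show (L.foldl (fun d w => d.modify (PySem.Str.lower w) [] (fun ms => ms ++ [w]))
          PySem.Dict.empty)
        = (L.map (fun w => (PySem.Str.lower w, w))).foldl
            (fun d p => d.modify p.1 [] (fun ms => ms ++ [p.2])) PySem.Dict.empty
      from by rw [List.foldl_map]]
    rw [PySem.Dict.getD_foldl_modify_append]
    simp [pvGrp, List.filter_map, Function.comp_def, List.map_map]
  have hnd : (L.foldl (fun d w => d.modify (PySem.Str.lower w) [] (fun ms => ms ++ [w]))
        PySem.Dict.empty).keys.Nodup := by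
    rw [hkeys]
    exact PySem.Set.nodup_ofList _
  rw [PySem.Dict.items_eq_map_keys _ hnd [], hkeys]
  simp only [hgetD]
  rw [List.filter_map, List.map_map]
  have hid : ((fun (p : String × List String) => p.1) ∘ fun k => (k, pvGrp L k)) = id := rfl
  rw [hid, List.map_id]
  apply List.filter_congr
  intro k _
  show (!(pvBad L k)) = _
  simp only [Function.comp_def]
  exact (pv_good_eq_not_bad L k).symm
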